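-- pv_equiv track=rewrite | github.com/WertyUpi/IOM2 | src/grouping.py | group_keywords
-- ===== SOURCE A (Python) =====
-- def group_keywords(data_to_group : list[list[str]], grouped_keywords : dict[str, set[str]]) -> list[dict[str, int]]:
--     result = list()
--     for question in data_to_group:      # groups all the keywords using info grom grouped_keywords dictionary, counts each group frequencies
--         result_for_question = dict()
--         for answer in question:
--             for word in answer:
--                 for group_name in grouped_keywords:
--                     if(word == group_name or word in grouped_keywords[group_name]):
--                         if(group_name in result_for_question):
--                             result_for_question[group_name] += 1
--                         else:
--                             result_for_question[group_name] = 0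
--         result.append(result_for_question)
--     return result
-- ===== SOURCE B (Python) =====
-- def group_keywords(data_to_group, grouped_keywords):
--     # Reverse index: character/word -> list of group names matching it (in dict order),
--     # so each word is looked up once instead of scanning every group.
--     # (A group matches a word if the word equals the group name or is in its keyword set;
--     # counts reproduce A's count-from-zero convention: first match stores 0.)
--     index = {}
--     for group_name, keywords in grouped_keywords.items():
--         for w in {group_name} | set(keywords):
--             index.setdefault(w, []).append(group_name)
--     result = []
--     for question in data_to_group:
--         counts = {}
--         for answer in question:
--             for ch in answer:
--                 for g in index.get(ch, []):
--                     counts[g] = counts.get(g, -1) + 1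
--         result.append(counts)
--     return result
-- ===== Notes on version B (the rewrite author's own statement) =====
-- stated objective: faster
-- what changed: B precomputes a reverse index from word to its matching group names once, then each question is counted by direct dictionary lookups per character instead of scanning every group (and its keyword set) for every character.
import Mathlib
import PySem

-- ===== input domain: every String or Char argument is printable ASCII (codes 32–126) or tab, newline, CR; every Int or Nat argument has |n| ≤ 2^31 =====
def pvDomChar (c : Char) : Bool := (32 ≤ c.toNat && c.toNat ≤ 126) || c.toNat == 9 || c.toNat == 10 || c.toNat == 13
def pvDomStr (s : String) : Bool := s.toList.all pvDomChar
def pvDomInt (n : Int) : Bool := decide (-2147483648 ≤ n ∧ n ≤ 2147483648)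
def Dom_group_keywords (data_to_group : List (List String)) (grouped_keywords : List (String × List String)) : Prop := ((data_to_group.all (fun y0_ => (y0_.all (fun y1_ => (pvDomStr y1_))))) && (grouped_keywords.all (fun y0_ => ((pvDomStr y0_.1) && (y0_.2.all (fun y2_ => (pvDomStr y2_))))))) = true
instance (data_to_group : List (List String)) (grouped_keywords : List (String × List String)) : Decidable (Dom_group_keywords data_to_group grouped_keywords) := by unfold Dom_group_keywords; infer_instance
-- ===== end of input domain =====

-- B replaces A's per-character scan over every group and keyword set by a reverse index
-- word -> matching group names built once (objective: faster in a timing run).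

-- ===== PORT A =====
-- one character of an answer, processed by A's innermost loop over all groups
def pvAStep (gk : List (String × List String)) (rq : PySem.Dict String Int) (ch : Char) : PySem.Dict String Int :=
  gk.foldl (fun rq gs =>
    if String.ofList [ch] == gs.1 || gs.2.contains (String.ofList [ch]) then
      if rq.contains gs.1 then rq.insert gs.1 (rq.getD gs.1 0 + 1)
      else rq.insert gs.1 0
    else rq) rq

def group_keywords (data_to_group : List (List String)) (grouped_keywords : List (String × List String)) : List (List (String × Int)) :=
  data_to_group.foldl (fun result question =>
    result ++ [(question.foldl (fun rq answer =>
      answer.toList.foldl (pvAStep grouped_keywords) rq) PySem.Dict.empty).items]) []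

-- ===== PORT B =====
-- reverse index: word -> list of group names matching it, in dict order.
-- ({group_name} | keywords) is ported in first-insertion order; the Python set's
-- iteration order does not affect the result: each member receives group_name at most
-- once, and the index is only looked up afterwards, never iterated.
def pvBuildIndex (gk : List (String × List String)) : PySem.Dict String (List String) :=
  gk.foldl (fun idx gs =>
    (PySem.Set.ofList (gs.1 :: gs.2)).foldl (fun idx w =>
      idx.modify w [] (· ++ [gs.1])) idx) PySem.Dict.empty

-- one character, processed by B's loop over the groups the index returns for it
def pvBStep (index : PySem.Dict String (List String)) (counts : PySem.Dict String Int) (ch : Char) : PySem.Dict String Int :=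
  (index.getD (String.ofList [ch]) []).foldl (fun counts g =>
    counts.insert g (counts.getD g (-1) + 1)) counts

def group_keywords_alt (data_to_group : List (List String)) (grouped_keywords : List (String × List String)) : List (List (String × Int)) :=
  let index := pvBuildIndex grouped_keywords
  data_to_group.foldl (fun result question =>
    result ++ [(question.foldl (fun counts answer =>
      answer.toList.foldl (pvBStep index) counts) PySem.Dict.empty).items]) []

-- ===== PRECONDITION & SPEC =====
def Spec_group_keywords (data_to_group : List (List String)) (grouped_keywords : List (String × List String)) (out : List (List (String × Int))) : Prop := out = group_keywords_alt data_to_group grouped_keywords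
instance (data_to_group : List (List String)) (grouped_keywords : List (String × List String)) (out : List (List (String × Int))) : Decidable (Spec_group_keywords data_to_group grouped_keywords out) := by unfold Spec_group_keywords; infer_instance

-- ===== CLAIM (what is proved, stated in full; the proofs are below) =====
def Claim_equal_group_keywords : Prop := ∀ (data_to_group : List (List String)) (grouped_keywords : List (String × List String)), Dom_group_keywords data_to_group grouped_keywords → Spec_group_keywords data_to_group grouped_keywords (group_keywords data_to_group grouped_keywords)

-- ===== LEMMAS AND PROOFS =====

-- appending a constant g to idx[w] once per occurrence of w in ms
theorem pv_getD_foldl_modify_const (ms : List String) (g : String)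
    (idx : PySem.Dict String (List String)) (w : String) :
    ((ms.foldl (fun idx u => idx.modify u [] (· ++ [g])) idx).getD w []) =
      idx.getD w [] ++ List.replicate (ms.count w) g := by
  induction ms generalizing idx with
  | nil => simp
  | cons u ms ih =>
      simp only [List.foldl_cons, ih, PySem.Dict.getD_modify, List.count_cons]
      by_cases h : w = u
      · subst h
        simp [List.replicate_succ, List.append_assoc]
      · have h' : ¬ u = w := fun hc => h hc.symm
        simp [h, h']

-- the reverse index returns exactly the matching group names, in gk order
theorem pv_buildIndex_getD_aux (gk : List (String × List String)) (w : String) :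
    ∀ (idx : PySem.Dict String (List String)),
      ((gk.foldl (fun idx gs =>
        (PySem.Set.ofList (gs.1 :: gs.2)).foldl (fun idx w =>
          idx.modify w [] (· ++ [gs.1])) idx) idx).getD w []) =
      idx.getD w [] ++ (gk.filter (fun gs => w == gs.1 || gs.2.contains w)).map Prod.fst := by
  induction gk with
  | nil => simp
  | cons gs gk ih =>
      intro idx
      rw [List.foldl_cons, ih, pv_getD_foldl_modify_const, List.filter_cons]
      by_cases hp : w = gs.1 ∨ w ∈ gs.2
      · simp [hp, List.append_assoc]
      · have hw : w ∉ PySem.Set.ofList (gs.1 :: gs.2) := by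
          rw [PySem.Set.mem_ofList]; simpa [eq_comm] using hp
        have hc : (PySem.Set.ofList (gs.1 :: gs.2)).count w = 0 := List.count_eq_zero.mpr hw
        simp [hp, hc]

theorem pv_buildIndex_getD (gk : List (String × List String)) (w : String) :
    (pvBuildIndex gk).getD w [] =
      (gk.filter (fun gs => w == gs.1 || gs.2.contains w)).map Prod.fst := by
  unfold pvBuildIndex
  rw [pv_buildIndex_getD_aux]
  simp only [PySem.Dict.getD_empty, List.nil_append]

-- A's conditional update equals B's get-with-default update
theorem pv_update_eq (rq : PySem.Dict String Int) (g : String) :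
    (if rq.contains g then rq.insert g (rq.getD g 0 + 1) else rq.insert g 0) =
      rq.insert g (rq.getD g (-1) + 1) := by
  cases hg : rq.get? g with
  | some v =>
      have hc : rq.contains g = true := by
        rw [PySem.Dict.contains_eq_isSome_get?, hg]; rfl
      simp [hc, PySem.Dict.getD_eq_get?_getD, hg]
  | none =>
      have hc : rq.contains g = false := by
        rw [PySem.Dict.contains_eq_isSome_get?, hg]; rfl
      simp [hc, PySem.Dict.getD_eq_get?_getD, hg]

-- a guarded fold over gk equals the unguarded fold over the filtered group names
theorem pv_step_eq (gk : List (String × List String)) :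
    pvAStep gk = pvBStep (pvBuildIndex gk) := by
  funext rq ch
  unfold pvAStep pvBStep
  rw [pv_buildIndex_getD]
  generalize String.ofList [ch] = w
  induction gk generalizing rq with
  | nil => rfl
  | cons gs gk ih =>
      simp only [List.foldl_cons, List.filter_cons]
      by_cases h : (w == gs.1 || gs.2.contains w) = true
      · simp only [h, if_pos, List.map_cons, List.foldl_cons]
        rw [pv_update_eq]
        exact ih _
      · simp only [h, if_neg, Bool.false_eq_true, not_false_iff]
        exact ih rq

-- ===== VERDICT (by name: the statement is the Claim_ definition above) =====
theorem group_keywords_spec : Claim_equal_group_keywords := by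
  intro dtg gk _
  unfold Spec_group_keywords group_keywords group_keywords_alt
  rw [pv_step_eq]
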